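-- pv_equiv track=rewrite | github.com/KazukiNoSuzaku/Leetcode | Python/1591_Strange_Printer_II.py | isPrintable
-- ===== SOURCE A (Python) =====
-- from collections import defaultdict, deque
--
-- def isPrintable(targetGrid):
--     """
--     :type targetGrid: List[List[int]]
--     :rtype: bool
--     """
--     rows, cols = len(targetGrid), len(targetGrid[0])
--     # Find bounding box for each color
--     bbox = {}
--     for r in range(rows):
--         for c in range(cols):
--             color = targetGrid[r][c]
--             if color not in bbox:
--                 bbox[color] = [r, c, r, c]
--             else:
--                 bbox[color][0] = min(bbox[color][0], r)
--                 bbox[color][1] = min(bbox[color][1], c)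
--                 bbox[color][2] = max(bbox[color][2], r)
--                 bbox[color][3] = max(bbox[color][3], c)
--
--     # Build dependency graph: color A depends on color B if B appears inside A's bbox
--     graph = defaultdict(set)
--     in_degree = {color: 0 for color in bbox}
--
--     for color, (r1, c1, r2, c2) in bbox.items():
--         for r in range(r1, r2 + 1):
--             for c in range(c1, c2 + 1):
--                 other = targetGrid[r][c]
--                 if other != color and other not in graph[color]:
--                     graph[color].add(other)
--                     in_degree[other] = in_degree.get(other, 0) + 1
--
--     # Topological sort
--     queue = deque([c for c in in_degree if in_degree[c] == 0])
--     processed = 0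
--     while queue:
--         color = queue.popleft()
--         processed += 1
--         for dep in graph[color]:
--             in_degree[dep] -= 1
--             if in_degree[dep] == 0:
--                 queue.append(dep)
--
--     return processed == len(bbox)
-- ===== SOURCE B (Python) =====
-- def isPrintable(targetGrid):
--     rows, cols = len(targetGrid), len(targetGrid[0])
--     # Find bounding box for each color (as in A)
--     bbox = {}
--     for r in range(rows):
--         for c in range(cols):
--             color = targetGrid[r][c]
--             if color not in bbox:
--                 bbox[color] = [r, c, r, c]
--             else:
--                 bbox[color][0] = min(bbox[color][0], r)
--                 bbox[color][1] = min(bbox[color][1], c)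
--                 bbox[color][2] = max(bbox[color][2], r)
--                 bbox[color][3] = max(bbox[color][3], c)
--
--     def blocks(other, col):
--         # does `other`'s rectangle cover a cell currently colored `col`?
--         r1, c1, r2, c2 = bbox[other]
--         return any(targetGrid[r][c] == col
--                    for r in range(r1, r2 + 1) for c in range(c1, c2 + 1))
--
--     # Greedy peeling: repeatedly discard every color that no other remaining
--     # color's rectangle would have to paint over (it can be printed before
--     # all remaining ones).  Printable iff everything gets discarded.
--     live = list(bbox)
--     while live:
--         remaining = [col for col in live
--                      if any(other != col and blocks(other, col) for other in live)]
--         if len(remaining) == len(live):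
--             return False
--         live = remaining
--     return True
-- ===== Notes on version B (the rewrite author's own statement) =====
-- stated objective: simpler
-- what changed: Replaces the dependency graph, in-degree table and Kahn topological-sort queue by a greedy peeling loop that repeatedly discards any color whose cells are covered by no other remaining color's bounding rectangle, succeeding iff every color is discarded.
import Mathlib
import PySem

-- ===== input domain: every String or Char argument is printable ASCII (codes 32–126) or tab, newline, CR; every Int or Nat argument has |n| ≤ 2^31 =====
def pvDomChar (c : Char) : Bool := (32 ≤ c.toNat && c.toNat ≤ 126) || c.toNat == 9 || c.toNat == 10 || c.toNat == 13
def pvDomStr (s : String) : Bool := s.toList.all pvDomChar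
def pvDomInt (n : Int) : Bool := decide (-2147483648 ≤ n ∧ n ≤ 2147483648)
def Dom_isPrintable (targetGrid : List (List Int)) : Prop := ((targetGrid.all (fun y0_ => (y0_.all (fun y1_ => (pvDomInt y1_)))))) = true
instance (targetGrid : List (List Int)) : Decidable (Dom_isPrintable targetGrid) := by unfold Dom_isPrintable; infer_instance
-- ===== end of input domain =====

-- B replaces A's dependency graph + Kahn topological sort by a greedy peeling loop over the
-- colors (discard a color when no other remaining color's rectangle covers one of its cells);
-- the proof shows both decide the same closure condition.

-- ===== PORT A =====

-- targetGrid[r][c]; exact whenever 0 ≤ r < len(targetGrid) and 0 ≤ c < len(targetGrid[r]),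
-- which Pre_ guarantees for every access both programs make.
def cellAt (g : List (List Int)) (r c : Int) : Int :=
  PySem.List.pyGetD (PySem.List.pyGetD g r []) c 0

-- the bounding-box pass (this code is textually identical in A and in B, so the helper is shared):
-- bbox[color] = [minR, minC, maxR, maxC].  A mutates the 4-element list in place; the four slots
-- are distinct, so rebuilding the list with the same four values is exact.
def bboxStep (g : List (List Int)) (b : PySem.Dict Int (List Int)) (r c : Int) :
    PySem.Dict Int (List Int) :=
  let color := cellAt g r c
  if b.contains color = false then b.insert color [r, c, r, c]
  else
    let l := b.getD color []
    b.insert color [min (PySem.List.pyGetD l 0 0) r, min (PySem.List.pyGetD l 1 0) c,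
                    max (PySem.List.pyGetD l 2 0) r, max (PySem.List.pyGetD l 3 0) c]

def buildBBox (g : List (List Int)) (rows cols : Int) : PySem.Dict Int (List Int) :=
  (PySem.List.pyRange 0 rows 1).foldl (fun b r =>
    (PySem.List.pyRange 0 cols 1).foldl (fun b c => bboxStep g b r c) b) PySem.Dict.empty

-- one grid cell of the graph-building loop: graph/in_degree updates
-- (graph is a defaultdict(set); the entries its bare reads create are never observed, so the
-- reads are ported as getD with the empty set)
def graphCell (g : List (List Int)) (color : Int)
    (st : PySem.Dict Int (PySem.Set Int) × PySem.Dict Int Int) (r c : Int) :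
    PySem.Dict Int (PySem.Set Int) × PySem.Dict Int Int :=
  let other := cellAt g r c
  if other != color && !((st.1.getD color PySem.Set.empty).contains other) then
    (st.1.insert color (PySem.Set.add (st.1.getD color PySem.Set.empty) other),
     st.2.insert other (st.2.getD other 0 + 1))
  else st

-- for color, (r1, c1, r2, c2) in bbox.items(): for r in range(r1, r2+1): for c in range(c1, c2+1): …
def buildGraphIndeg (g : List (List Int)) (bbox : PySem.Dict Int (List Int))
    (indeg0 : PySem.Dict Int Int) :
    PySem.Dict Int (PySem.Set Int) × PySem.Dict Int Int :=
  bbox.items.foldl (fun st it =>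
    let color := it.1
    let r1 := PySem.List.pyGetD it.2 0 0
    let c1 := PySem.List.pyGetD it.2 1 0
    let r2 := PySem.List.pyGetD it.2 2 0
    let c2 := PySem.List.pyGetD it.2 3 0
    (PySem.List.pyRange r1 (r2 + 1) 1).foldl (fun st r =>
      (PySem.List.pyRange c1 (c2 + 1) 1).foldl (fun st c => graphCell g color st r c) st) st)
    (PySem.Dict.empty, indeg0)

-- the Kahn queue loop; the deque is a list popped at the head and appended at the tail.
-- Python's set iteration order over graph[color] is not modelled; the loop's RESULT (the count
-- of processed colors) is iteration-order independent, which is what the lemmas below prove.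
-- fuel: each color is enqueued (hence popped) at most once, so len(bbox) pops suffice;
-- the fuel-exhaustion arm is unreachable (established inside the proof).
def kahnLoop (graph : PySem.Dict Int (PySem.Set Int)) :
    Nat → List Int → PySem.Dict Int Int → Int → Int
  | _, [], _, processed => processed
  | 0, _ :: _, _, processed => processed
  | fuel + 1, color :: rest, indeg, processed =>
    let st := (graph.getD color PySem.Set.empty).foldl
      (fun (st : List Int × PySem.Dict Int Int) dep =>
        let v := st.2.getD dep 0 - 1
        if v == 0 then (st.1 ++ [dep], st.2.insert dep v) else (st.1, st.2.insert dep v))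
      (rest, indeg)
    kahnLoop graph fuel st.1 st.2 (processed + 1)

def isPrintable (targetGrid : List (List Int)) : Bool :=
  let rows : Int := targetGrid.length
  let cols : Int := (PySem.List.pyGetD targetGrid 0 []).length
  let bbox := buildBBox targetGrid rows cols
  let indeg0 : PySem.Dict Int Int :=
    bbox.keys.foldl (fun d c => d.insert c 0) PySem.Dict.empty
  let gi := buildGraphIndeg targetGrid bbox indeg0
  let queue := gi.2.keys.filter (fun c => gi.2.getD c 0 == 0)
  decide (kahnLoop gi.1 bbox.size queue gi.2 0 = (bbox.size : Int))

-- ===== PORT B =====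

-- does `other`'s rectangle cover a cell colored `col`?
def blocksB (g : List (List Int)) (bbox : PySem.Dict Int (List Int)) (other col : Int) : Bool :=
  let l := bbox.getD other []
  (PySem.List.pyRange (PySem.List.pyGetD l 0 0) (PySem.List.pyGetD l 2 0 + 1) 1).any (fun r =>
    (PySem.List.pyRange (PySem.List.pyGetD l 1 0) (PySem.List.pyGetD l 3 0 + 1) 1).any (fun c =>
      cellAt g r c == col))

-- while live: keep the blocked colors; stop with False when a pass removes nothing
def peelLoop (g : List (List Int)) (bbox : PySem.Dict Int (List Int)) (live : List Int) : Bool :=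
  if live = [] then true
  else
    let remaining := live.filter (fun col =>
      live.any (fun other => other != col && blocksB g bbox other col))
    if remaining.length = live.length then false
    else peelLoop g bbox remaining
termination_by live.length
decreasing_by
  rename_i _ h2
  simp only [List.unattach_filter, List.unattach_attach]
  simp only [remaining, List.unattach_filter, List.unattach_attach] at h2
  have hle := List.length_filter_le
    (fun col => live.any (fun other => other != col && blocksB g bbox other col)) live
  omega

def isPrintable_alt (targetGrid : List (List Int)) : Bool :=
  let rows : Int := targetGrid.length
  let cols : Int := (PySem.List.pyGetD targetGrid 0 []).length
  let bbox := buildBBox targetGrid rows cols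
  peelLoop targetGrid bbox bbox.keys

-- ===== PRECONDITION & SPEC =====

-- Pre_ excludes exactly the inputs where the Python raises IndexError: the empty grid
-- (targetGrid[0]) and ragged grids with a row shorter than the first row (targetGrid[r][c]).
def Pre_isPrintable (targetGrid : List (List Int)) : Prop :=
  targetGrid ≠ [] ∧ ∀ row ∈ targetGrid, targetGrid.headI.length ≤ row.length

instance (targetGrid : List (List Int)) : Decidable (Pre_isPrintable targetGrid) := by
  unfold Pre_isPrintable; infer_instance

def pvWitness_isPrintable : List (List Int) := [[1, 1], [1, 2]]

def Spec_isPrintable (targetGrid : List (List Int)) (out : Bool) : Prop := out = isPrintable_alt targetGrid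
instance (targetGrid : List (List Int)) (out : Bool) : Decidable (Spec_isPrintable targetGrid out) := by unfold Spec_isPrintable; infer_instance

-- ===== CLAIM (what is proved, stated in full; the proofs are below) =====
def Claim_equal_isPrintable : Prop := ∀ (targetGrid : List (List Int)), Dom_isPrintable targetGrid → Pre_isPrintable targetGrid → Spec_isPrintable targetGrid (isPrintable targetGrid)

-- ===== LEMMAS AND PROOFS =====

-- a 0/1-count over a Nodup list splits off one satisfying member
theorem isPrintable_countP_erase (l : List Int) (a : Int) (p : Int → Bool) (hnd : l.Nodup)
    (ha : a ∈ l) (hpa : p a = true) :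
    l.countP p = (l.countP (fun x => p x && !(x == a))) + 1 := by
  have hperm := List.perm_cons_erase ha
  have h1 : l.countP p = (l.erase a).countP p + 1 := by
    rw [hperm.countP_eq p]; simp [hpa]
  have h2 : l.countP (fun x => p x && !(x == a)) =
      (l.erase a).countP (fun x => p x && !(x == a)) := by
    rw [hperm.countP_eq]; simp
  have hna : a ∉ l.erase a := (List.Nodup.mem_erase_iff hnd).mp.mt (by simp)
  have h3 : (l.erase a).countP (fun x => p x && !(x == a)) = (l.erase a).countP p := by
    apply List.countP_congr; intro x hx
    have : x ≠ a := fun he => hna (he ▸ hx)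
    simp [this]
  omega

-- the scanned cell list, and the two bbox-pass loops flattened over it
def cellList (rows cols : Int) : List (Int × Int) :=
  (PySem.List.pyRange 0 rows 1).flatMap (fun r =>
    (PySem.List.pyRange 0 cols 1).map (fun c => (r, c)))

theorem isPrintable_mem_cellList (rows cols : Int) (rc : Int × Int) :
    rc ∈ cellList rows cols ↔
      rc.1 ∈ PySem.List.pyRange 0 rows 1 ∧ rc.2 ∈ PySem.List.pyRange 0 cols 1 := by
  cases rc with
  | mk r c =>
    simp only [cellList, List.mem_flatMap, List.mem_map]
    constructor
    · rintro ⟨r', hr', c', hc', he⟩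
      obtain ⟨rfl, rfl⟩ : r' = r ∧ c' = c := by
        constructor <;> [exact congrArg Prod.fst he; exact congrArg Prod.snd he]
      exact ⟨hr', hc'⟩
    · rintro ⟨hr, hc⟩; exact ⟨r, hr, c, hc, rfl⟩

-- the bbox value written at a cell (bboxStep is a single dict assignment)
def bboxVal (g : List (List Int)) (b : PySem.Dict Int (List Int)) (r c : Int) : List Int :=
  if b.contains (cellAt g r c) = false then [r, c, r, c]
  else
    let l := b.getD (cellAt g r c) []
    [min (PySem.List.pyGetD l 0 0) r, min (PySem.List.pyGetD l 1 0) c,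
     max (PySem.List.pyGetD l 2 0) r, max (PySem.List.pyGetD l 3 0) c]

theorem isPrintable_bboxStep_eq (g : List (List Int)) (b : PySem.Dict Int (List Int)) (r c : Int) :
    bboxStep g b r c = b.insert (cellAt g r c) (bboxVal g b r c) := by
  unfold bboxStep bboxVal; dsimp only; split_ifs <;> rfl

theorem isPrintable_buildBBox_eq (g : List (List Int)) (rows cols : Int) :
    buildBBox g rows cols =
      (cellList rows cols).foldl (fun b rc => b.insert (cellAt g rc.1 rc.2) (bboxVal g b rc.1 rc.2))
        PySem.Dict.empty := by
  unfold buildBBox cellList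
  rw [List.foldl_flatMap]
  apply PySem.List.foldl_congr_mem
  intro b r _
  rw [List.foldl_map]
  exact PySem.List.foldl_congr_mem _ _ _ _ (fun b c _ => isPrintable_bboxStep_eq g b r c)

-- `d` blocks-follows `c`: d ≠ c and d's color occurs inside c's bounding rectangle
def Eb (g : List (List Int)) (bbox : PySem.Dict Int (List Int)) (c d : Int) : Bool :=
  (d != c) && blocksB g bbox c d

-- the colors that must be printable: closure of "all my in-rectangle predecessors are printable"
inductive Cl (g : List (List Int)) (bbox : PySem.Dict Int (List Int)) (keys : List Int) : Int → Prop
  | intro (c : Int) (hc : c ∈ keys)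
      (hp : ∀ d ∈ keys, Eb g bbox d c = true → Cl g bbox keys d) : Cl g bbox keys c

-- remaining predecessor count of d, relative to a processed list P
def pc (g : List (List Int)) (bbox : PySem.Dict Int (List Int)) (keys : List Int)
    (P : List Int) (d : Int) : Int :=
  (keys.countP (fun c => Eb g bbox c d && !(decide (c ∈ P))) : Int)

theorem isPrintable_buildBBox_keys (g : List (List Int)) (rows cols : Int) :
    (buildBBox g rows cols).keys =
      PySem.Set.ofList ((cellList rows cols).map (fun rc => cellAt g rc.1 rc.2)) := by
  rw [isPrintable_buildBBox_eq,
    PySem.Dict.keys_foldl_insert_key (cellList rows cols) (fun rc => cellAt g rc.1 rc.2)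
      (fun b rc => bboxVal g b rc.1 rc.2) PySem.Dict.empty]
  simp [PySem.Set.update_nil_left]

theorem isPrintable_key_iff (g : List (List Int)) (rows cols : Int) (d : Int) :
    d ∈ (buildBBox g rows cols).keys ↔
      ∃ r ∈ PySem.List.pyRange 0 rows 1, ∃ c ∈ PySem.List.pyRange 0 cols 1, cellAt g r c = d := by
  rw [isPrintable_buildBBox_keys, PySem.Set.mem_ofList, List.mem_map]
  constructor
  · rintro ⟨rc, hrc, rfl⟩
    obtain ⟨h1, h2⟩ := (isPrintable_mem_cellList rows cols rc).mp hrc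
    exact ⟨rc.1, h1, rc.2, h2, rfl⟩
  · rintro ⟨r, hr, c, hc, rfl⟩
    exact ⟨(r, c), (isPrintable_mem_cellList rows cols (r, c)).mpr ⟨hr, hc⟩, rfl⟩

theorem isPrintable_keys_nodup (g : List (List Int)) (rows cols : Int) :
    (buildBBox g rows cols).keys.Nodup := by
  rw [isPrintable_buildBBox_keys]; exact PySem.Set.nodup_ofList _

-- every coordinate stored in a bbox entry is a scanned coordinate
-- the fold invariant behind isPrintable_bbox_wf
theorem isPrintable_bbox_inv (g : List (List Int)) (rows cols : Int) (L : List (Int × Int))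
    (hL : ∀ rc ∈ L, (0 ≤ rc.1 ∧ rc.1 < rows) ∧ (0 ≤ rc.2 ∧ rc.2 < cols))
    (b0 : PySem.Dict Int (List Int))
    (hb0 : ∀ c, b0.contains c = true → ∃ a b a' b', b0.getD c [] = [a, b, a', b'] ∧
      0 ≤ a ∧ a' < rows ∧ 0 ≤ b ∧ b' < cols) :
    ∀ c, (L.foldl (fun b rc => b.insert (cellAt g rc.1 rc.2) (bboxVal g b rc.1 rc.2)) b0).contains c = true →
      ∃ a b a' b',
        (L.foldl (fun b rc => b.insert (cellAt g rc.1 rc.2) (bboxVal g b rc.1 rc.2)) b0).getD c [] = [a, b, a', b'] ∧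
        0 ≤ a ∧ a' < rows ∧ 0 ≤ b ∧ b' < cols := by
  induction L generalizing b0 with
  | nil => exact hb0
  | cons rc L ih =>
    simp only [List.foldl_cons]
    apply ih (fun p hp => hL p (List.mem_cons_of_mem rc hp))
    intro c hc
    obtain ⟨⟨hr0, hr1⟩, ⟨hc0, hc1⟩⟩ := hL rc (List.mem_cons_self ..)
    rw [PySem.Dict.getD_insert]
    by_cases hkey : c = cellAt g rc.1 rc.2
    · simp only [if_pos hkey]
      unfold bboxVal
      by_cases hcont : b0.contains (cellAt g rc.1 rc.2) = false
      · simp only [if_pos hcont]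
        exact ⟨rc.1, rc.2, rc.1, rc.2, rfl, hr0, hr1, hc0, hc1⟩
      · simp only [if_neg hcont]
        obtain ⟨a, b, a', b', hval, ha0, ha1, hb0', hb1⟩ :=
          hb0 (cellAt g rc.1 rc.2) (by revert hcont; cases b0.contains (cellAt g rc.1 rc.2) <;> simp)
        rw [hval]
        simp only [pysem, List.getD_eq_getElem?_getD, List.getElem?_cons_zero,
          List.getElem?_cons_succ, Option.getD_some]
        exact ⟨_, _, _, _, rfl, by omega, by omega, by omega, by omega⟩
    · simp only [if_neg hkey]
      apply hb0
      rw [PySem.Dict.contains_insert] at hc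
      simpa [hkey] using hc

theorem isPrintable_bbox_wf (g : List (List Int)) (rows cols : Int) (c : Int)
    (hc : c ∈ (buildBBox g rows cols).keys) :
    ∃ a b a' b', (buildBBox g rows cols).getD c [] = [a, b, a', b'] ∧
      0 ≤ a ∧ a' < rows ∧ 0 ≤ b ∧ b' < cols := by
  rw [isPrintable_buildBBox_eq] at hc ⊢
  apply isPrintable_bbox_inv g rows cols _ _ PySem.Dict.empty
  · intro c hc; simp [PySem.Dict.contains_empty] at hc
  · rw [← isPrintable_buildBBox_eq]
    exact ((buildBBox g rows cols).contains_iff_mem_keys c).mpr (by rwa [isPrintable_buildBBox_eq])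
  all_goals
    intro rc hrc
    obtain ⟨h1, h2⟩ := (isPrintable_mem_cellList rows cols rc).mp hrc
    rw [PySem.List.mem_pyRange_one] at h1 h2
    exact ⟨h1, h2⟩

-- a blocked-by-key color is itself a key
-- blocksB as an existential over the scanned grid
theorem isPrintable_blocksB_iff (g : List (List Int)) (rows cols : Int) (c d : Int) :
    blocksB g (buildBBox g rows cols) c d = true ↔
      ∃ r ∈ PySem.List.pyRange (PySem.List.pyGetD ((buildBBox g rows cols).getD c []) 0 0)
          (PySem.List.pyGetD ((buildBBox g rows cols).getD c []) 2 0 + 1) 1,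
        ∃ cc ∈ PySem.List.pyRange (PySem.List.pyGetD ((buildBBox g rows cols).getD c []) 1 0)
          (PySem.List.pyGetD ((buildBBox g rows cols).getD c []) 3 0 + 1) 1,
        cellAt g r cc = d := by
  unfold blocksB
  simp [List.any_eq_true]

theorem isPrintable_Eb_mem (g : List (List Int)) (rows cols : Int) (c d : Int)
    (hc : c ∈ (buildBBox g rows cols).keys)
    (h : Eb g (buildBBox g rows cols) c d = true) :
    d ∈ (buildBBox g rows cols).keys := by
  unfold Eb at h
  obtain ⟨-, hb⟩ := Bool.and_eq_true_iff.mp h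
  obtain ⟨r, hr, cc, hcc, hval⟩ := (isPrintable_blocksB_iff g rows cols c d).mp hb
  obtain ⟨a, b, a', b', hbb, ha0, ha1, hb0, hb1⟩ := isPrintable_bbox_wf g rows cols c hc
  rw [hbb] at hr hcc
  simp only [pysem, List.getD_eq_getElem?_getD, List.getElem?_cons_zero,
    List.getElem?_cons_succ, Option.getD_some] at hr hcc
  exact (isPrintable_key_iff g rows cols d).mpr
    ⟨r, PySem.List.mem_pyRange_one.mpr (by omega), cc,
     PySem.List.mem_pyRange_one.mpr (by omega), hval⟩

-- ---- A side: characterize the graph/in_degree construction ----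

-- the two branches of graphCell as equations
theorem isPrintable_graphCell_pos (g : List (List Int)) (color : Int)
    (gr : PySem.Dict Int (PySem.Set Int)) (ind : PySem.Dict Int Int) (r c : Int)
    (h : ((cellAt g r c != color) && !((gr.getD color PySem.Set.empty).contains (cellAt g r c))) = true) :
    graphCell g color (gr, ind) r c =
      (gr.insert color (PySem.Set.add (gr.getD color PySem.Set.empty) (cellAt g r c)),
       ind.insert (cellAt g r c) (ind.getD (cellAt g r c) 0 + 1)) := by
  unfold graphCell; dsimp only; rw [if_pos h]

theorem isPrintable_graphCell_neg (g : List (List Int)) (color : Int)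
    (gr : PySem.Dict Int (PySem.Set Int)) (ind : PySem.Dict Int Int) (r c : Int)
    (h : ¬ ((cellAt g r c != color) && !((gr.getD color PySem.Set.empty).contains (cellAt g r c))) = true) :
    graphCell g color (gr, ind) r c = (gr, ind) := by
  unfold graphCell; dsimp only; rw [if_neg h]

-- the inner scan over one color's rectangle, fully characterized
theorem isPrintable_scan (g : List (List Int)) (color : Int) (cells : List (Int × Int)) :
    ∀ (gr : PySem.Dict Int (PySem.Set Int)) (ind : PySem.Dict Int Int),
      (∀ d, d ∈ (cells.foldl (fun st rc => graphCell g color st rc.1 rc.2) (gr, ind)).1.getD color PySem.Set.empty ↔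
         d ∈ gr.getD color PySem.Set.empty ∨ (d ≠ color ∧ ∃ rc ∈ cells, cellAt g rc.1 rc.2 = d))
    ∧ ((gr.getD color PySem.Set.empty).Nodup →
        ((cells.foldl (fun st rc => graphCell g color st rc.1 rc.2) (gr, ind)).1.getD color PySem.Set.empty).Nodup)
    ∧ (∀ x, x ≠ color →
        (cells.foldl (fun st rc => graphCell g color st rc.1 rc.2) (gr, ind)).1.getD x PySem.Set.empty
          = gr.getD x PySem.Set.empty)
    ∧ (∀ d, (cells.foldl (fun st rc => graphCell g color st rc.1 rc.2) (gr, ind)).2.getD d 0 =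
        ind.getD d 0 +
        (if d ∈ (cells.foldl (fun st rc => graphCell g color st rc.1 rc.2) (gr, ind)).1.getD color PySem.Set.empty
            ∧ d ∉ gr.getD color PySem.Set.empty then 1 else 0))
    ∧ (∀ x, x ∈ (cells.foldl (fun st rc => graphCell g color st rc.1 rc.2) (gr, ind)).2.keys ↔
        x ∈ ind.keys ∨
        (x ∈ (cells.foldl (fun st rc => graphCell g color st rc.1 rc.2) (gr, ind)).1.getD color PySem.Set.empty
          ∧ x ∉ gr.getD color PySem.Set.empty))
    ∧ (ind.keys.Nodup →
        (cells.foldl (fun st rc => graphCell g color st rc.1 rc.2) (gr, ind)).2.keys.Nodup) := by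
  induction cells with
  | nil =>
    intro gr ind
    exact ⟨fun d => by simp, fun h => h, fun x _ => rfl, fun d => by simp, fun x => by simp, fun h => h⟩
  | cons rc rest ih =>
    intro gr ind
    rw [List.foldl_cons]
    by_cases hcond : ((cellAt g rc.1 rc.2 != color) &&
        !((gr.getD color PySem.Set.empty).contains (cellAt g rc.1 rc.2))) = true
    · rw [isPrintable_graphCell_pos g color gr ind rc.1 rc.2 hcond]
      obtain ⟨hne, hnc⟩ := Bool.and_eq_true_iff.mp hcond
      have hne' : cellAt g rc.1 rc.2 ≠ color := by simpa using hne
      have hnc' : cellAt g rc.1 rc.2 ∉ gr.getD color PySem.Set.empty := by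
        simpa [PySem.Set.contains_iff] using hnc
      set other := cellAt g rc.1 rc.2 with hother
      set S1 := PySem.Set.add (gr.getD color PySem.Set.empty) other with hS1
      obtain ⟨ia, ib, ic, id', ie, if'⟩ := ih (gr.insert color S1) (ind.insert other (ind.getD other 0 + 1))
      have hgetS1 : (gr.insert color S1).getD color PySem.Set.empty = S1 :=
        PySem.Dict.getD_insert_self gr color S1 _
      rw [hgetS1] at ia ib id' ie
      have hmemS1 : ∀ d, d ∈ S1 ↔ d ∈ gr.getD color PySem.Set.empty ∨ d = other := by
        intro d; rw [hS1, PySem.Set.mem_add]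
      have hSsub : other ∈ (rest.foldl (fun st rc => graphCell g color st rc.1 rc.2)
          (gr.insert color S1, ind.insert other (ind.getD other 0 + 1))).1.getD color PySem.Set.empty := by
        rw [ia]; exact Or.inl ((hmemS1 other).mpr (Or.inr rfl))
      refine ⟨?_, ?_, ?_, ?_, ?_, ?_⟩
      · intro d
        rw [ia, hmemS1]
        constructor
        · rintro ((h | rfl) | ⟨hd, rc', hrc', hv⟩)
          · exact Or.inl h
          · exact Or.inr ⟨hne', rc, List.mem_cons_self .., rfl⟩
          · exact Or.inr ⟨hd, rc', List.mem_cons_of_mem rc hrc', hv⟩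
        · rintro (h | ⟨hd, rc', hrc', hv⟩)
          · exact Or.inl (Or.inl h)
          · rcases List.mem_cons.mp hrc' with rfl | hr
            · exact Or.inl (Or.inr hv.symm)
            · exact Or.inr ⟨hd, rc', hr, hv⟩
      · intro hnd
        exact ib (by rw [hS1]; exact PySem.Set.nodup_add _ _ hnd)
      · intro x hx
        rw [ic x hx, PySem.Dict.getD_insert]
        simp [hx]
      · intro d
        rw [id' d, PySem.Dict.getD_insert]
        by_cases hd : d = other
        · have h1 : d ∈ S1 := (hmemS1 d).mpr (Or.inr hd)
          rw [if_pos hd, if_neg (fun hc => hc.2 h1), if_pos ⟨by rw [hd]; exact hSsub, by rw [hd]; exact hnc'⟩, hd]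
          ring
        · rw [if_neg hd]
          have heq : (d ∈ (rest.foldl (fun st rc => graphCell g color st rc.1 rc.2)
              (gr.insert color S1, ind.insert other (ind.getD other 0 + 1))).1.getD color PySem.Set.empty
              ∧ d ∉ S1) ↔
              (d ∈ (rest.foldl (fun st rc => graphCell g color st rc.1 rc.2)
              (gr.insert color S1, ind.insert other (ind.getD other 0 + 1))).1.getD color PySem.Set.empty
              ∧ d ∉ gr.getD color PySem.Set.empty) := by
            constructor
            · rintro ⟨h1, h2⟩
              exact ⟨h1, fun hc => h2 ((hmemS1 d).mpr (Or.inl hc))⟩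
            · rintro ⟨h1, h2⟩
              refine ⟨h1, fun hc => ?_⟩
              rcases (hmemS1 d).mp hc with h | h
              · exact h2 h
              · exact hd h
          rw [if_congr heq rfl rfl]
      · intro x
        rw [ie x, PySem.Dict.mem_keys_insert]
        by_cases hx : x = other
        · subst hx
          constructor
          · intro _; exact Or.inr ⟨hSsub, hnc'⟩
          · intro _; exact Or.inl (Or.inl rfl)
        · constructor
          · rintro ((hx' | h) | ⟨h1, h2⟩)
            · exact absurd hx' hx
            · exact Or.inl h
            · exact Or.inr ⟨h1, fun hc => h2 ((hmemS1 x).mpr (Or.inl hc))⟩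
          · rintro (h | ⟨h1, h2⟩)
            · exact Or.inl (Or.inr h)
            · by_cases hS : x ∈ S1
              · rcases (hmemS1 x).mp hS with h | h
                · exact absurd h h2
                · exact absurd h hx
              · exact Or.inr ⟨h1, hS⟩
      · intro hnd
        exact if' (PySem.Dict.nodup_keys_insert _ _ _ hnd)
    · rw [isPrintable_graphCell_neg g color gr ind rc.1 rc.2 hcond]
      obtain ⟨ia, ib, ic, id', ie, if'⟩ := ih gr ind
      have hcond' : cellAt g rc.1 rc.2 = color ∨ cellAt g rc.1 rc.2 ∈ gr.getD color PySem.Set.empty := by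
        by_cases h1 : cellAt g rc.1 rc.2 = color
        · exact Or.inl h1
        · refine Or.inr ?_
          by_contra h2
          exact hcond (by
            simp only [Bool.and_eq_true, bne_iff_ne, ne_eq, Bool.not_eq_true']
            exact ⟨h1, by simpa [PySem.Set.contains_iff] using h2⟩)
      refine ⟨?_, ib, ic, id', ie, if'⟩
      intro d
      rw [ia]
      constructor
      · rintro (h | ⟨hd, rc', hrc', hv⟩)
        · exact Or.inl h
        · exact Or.inr ⟨hd, rc', List.mem_cons_of_mem rc hrc', hv⟩
      · rintro (h | ⟨hd, rc', hrc', hv⟩)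
        · exact Or.inl h
        · rcases List.mem_cons.mp hrc' with rfl | hr
          · rcases hcond' with hc | hc
            · exact absurd (hv ▸ hc) hd
            · exact Or.inl (hv ▸ hc)
          · exact Or.inr ⟨hd, rc', hr, hv⟩

-- generic: a nested fold over two ranges is a fold over the pair list
def rcPairs (ra rb ca cb : Int) : List (Int × Int) :=
  (PySem.List.pyRange ra rb 1).flatMap (fun r => (PySem.List.pyRange ca cb 1).map (fun c => (r, c)))

theorem isPrintable_foldl_rcPairs {σ : Type} (f : σ → Int → Int → σ) (ra rb ca cb : Int) (init : σ) :
    (PySem.List.pyRange ra rb 1).foldl (fun s r => (PySem.List.pyRange ca cb 1).foldl (fun s c => f s r c) s) init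
      = (rcPairs ra rb ca cb).foldl (fun s rc => f s rc.1 rc.2) init := by
  rw [rcPairs, List.foldl_flatMap]
  apply PySem.List.foldl_congr_mem
  intro s r _
  rw [List.foldl_map]

theorem isPrintable_mem_rcPairs (ra rb ca cb : Int) (rc : Int × Int) :
    rc ∈ rcPairs ra rb ca cb ↔ rc.1 ∈ PySem.List.pyRange ra rb 1 ∧ rc.2 ∈ PySem.List.pyRange ca cb 1 := by
  cases rc with
  | mk r c =>
    simp only [rcPairs, List.mem_flatMap, List.mem_map]
    constructor
    · rintro ⟨r', hr', c', hc', he⟩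
      obtain ⟨rfl, rfl⟩ : r' = r ∧ c' = c := by
        constructor <;> [exact congrArg Prod.fst he; exact congrArg Prod.snd he]
      exact ⟨hr', hc'⟩
    · rintro ⟨hr, hc⟩; exact ⟨r, hr, c, hc, rfl⟩

-- the rectangle of a color as a cell list
def regionCells (B : PySem.Dict Int (List Int)) (c : Int) : List (Int × Int) :=
  rcPairs (PySem.List.pyGetD (B.getD c []) 0 0) (PySem.List.pyGetD (B.getD c []) 2 0 + 1)
    (PySem.List.pyGetD (B.getD c []) 1 0) (PySem.List.pyGetD (B.getD c []) 3 0 + 1)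

theorem isPrintable_Eb_iff_region (g : List (List Int)) (rows cols : Int) (c d : Int) :
    Eb g (buildBBox g rows cols) c d = true ↔
      d ≠ c ∧ ∃ rc ∈ regionCells (buildBBox g rows cols) c, cellAt g rc.1 rc.2 = d := by
  unfold Eb
  rw [Bool.and_eq_true_iff, bne_iff_ne, isPrintable_blocksB_iff g rows cols c d]
  constructor
  · rintro ⟨hne, r, hr, cc, hcc, hv⟩
    exact ⟨hne, (r, cc), (isPrintable_mem_rcPairs _ _ _ _ (r, cc)).mpr ⟨hr, hcc⟩, hv⟩
  · rintro ⟨hne, rc, hrc, hv⟩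
    obtain ⟨h1, h2⟩ := (isPrintable_mem_rcPairs _ _ _ _ rc).mp hrc
    exact ⟨hne, rc.1, h1, rc.2, h2, hv⟩

-- the in_degree initialisation {color: 0 for color in bbox}
theorem isPrintable_indeg0_getD (K : List Int) :
    ∀ (d0 : PySem.Dict Int Int), (∀ x, d0.getD x 0 = 0) →
      ∀ x, (K.foldl (fun d c => d.insert c 0) d0).getD x 0 = 0 := by
  induction K with
  | nil => intro d0 h x; exact h x
  | cons c K ih =>
    intro d0 h x
    apply ih
    intro y
    rw [PySem.Dict.getD_insert]
    by_cases hy : y = c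
    · rw [if_pos hy]
    · rw [if_neg hy]; exact h y

theorem isPrintable_indeg0_keys (K : List Int) (hnd : K.Nodup) :
    (K.foldl (fun d c => d.insert c 0) (PySem.Dict.empty : PySem.Dict Int Int)).keys = K := by
  rw [PySem.Dict.keys_foldl_insert_key K (fun c => c) (fun _ _ => 0) PySem.Dict.empty]
  simp only [PySem.Dict.keys_empty, List.map_id']
  rw [PySem.Set.update_nil_left, PySem.Set.ofList_eq_self_of_nodup _ hnd]

-- the graph/in_degree building pass, rewritten as a fold over the key list
theorem isPrintable_buildGraphIndeg_eq (g : List (List Int)) (B : PySem.Dict Int (List Int))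
    (indeg0 : PySem.Dict Int Int) (hnd : B.keys.Nodup) :
    buildGraphIndeg g B indeg0 =
      B.keys.foldl (fun st c =>
        (regionCells B c).foldl (fun st rc => graphCell g c st rc.1 rc.2) st)
        (PySem.Dict.empty, indeg0) := by
  unfold buildGraphIndeg
  rw [PySem.Dict.items_eq_map_keys B hnd [], List.foldl_map]
  apply PySem.List.foldl_congr_mem
  intro st k _
  dsimp only
  rw [isPrintable_foldl_rcPairs (fun st r c => graphCell g k st r c)]
  rfl

-- colors not in the remaining list keep their graph entry through the outer loop
theorem isPrintable_outer_untouched (g : List (List Int)) (B : PySem.Dict Int (List Int)) :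
    ∀ (L : List Int) (st : PySem.Dict Int (PySem.Set Int) × PySem.Dict Int Int) (c : Int), c ∉ L →
      (L.foldl (fun st c' => (regionCells B c').foldl (fun st rc => graphCell g c' st rc.1 rc.2) st) st).1.getD c PySem.Set.empty
        = st.1.getD c PySem.Set.empty := by
  intro L
  induction L with
  | nil => intro st c _; rfl
  | cons c1 L ihL =>
    intro st c hc
    obtain ⟨gr, ind⟩ := st
    rw [List.foldl_cons]
    obtain ⟨_, _, tc, _, _, _⟩ := isPrintable_scan g c1 (regionCells B c1) gr ind
    rw [ihL _ c (fun h => hc (List.mem_cons_of_mem c1 h))]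
    exact tc c (fun he => hc (he ▸ List.mem_cons_self ..))

-- the outer loop over colors: final graph and in_degree, characterized
theorem isPrintable_build_inv (g : List (List Int)) (B : PySem.Dict Int (List Int)) :
    ∀ (L : List Int) (gr : PySem.Dict Int (PySem.Set Int)) (ind : PySem.Dict Int Int) (F : Int → Int),
      L.Nodup → (∀ c ∈ L, gr.getD c PySem.Set.empty = PySem.Set.empty) →
      (∀ d, ind.getD d 0 = F d) →
      (∀ c ∈ L,
        (∀ d, d ∈ (L.foldl (fun st c => (regionCells B c).foldl (fun st rc => graphCell g c st rc.1 rc.2) st) (gr, ind)).1.getD c PySem.Set.empty ↔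
          (d ≠ c ∧ ∃ rc ∈ regionCells B c, cellAt g rc.1 rc.2 = d)) ∧
        ((L.foldl (fun st c => (regionCells B c).foldl (fun st rc => graphCell g c st rc.1 rc.2) st) (gr, ind)).1.getD c PySem.Set.empty).Nodup)
      ∧ (∀ d, (L.foldl (fun st c => (regionCells B c).foldl (fun st rc => graphCell g c st rc.1 rc.2) st) (gr, ind)).2.getD d 0 =
          F d + (L.countP (fun c => decide (d ≠ c ∧ ∃ rc ∈ regionCells B c, cellAt g rc.1 rc.2 = d)) : Int))
      ∧ (∀ x, x ∈ (L.foldl (fun st c => (regionCells B c).foldl (fun st rc => graphCell g c st rc.1 rc.2) st) (gr, ind)).2.keys ↔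
          x ∈ ind.keys ∨ ∃ c ∈ L, (x ≠ c ∧ ∃ rc ∈ regionCells B c, cellAt g rc.1 rc.2 = x))
      ∧ (ind.keys.Nodup →
          (L.foldl (fun st c => (regionCells B c).foldl (fun st rc => graphCell g c st rc.1 rc.2) st) (gr, ind)).2.keys.Nodup) := by
  intro L
  induction L with
  | nil =>
    intro gr ind F _ _ hindF
    exact ⟨fun c hc => absurd hc (by simp), fun d => by simpa using hindF d, fun x => by simp, fun h => h⟩
  | cons c0 L ih =>
    intro gr ind F hnd hfresh hindF
    rw [List.foldl_cons]
    obtain ⟨sa, sb, sc, sd, se, sf⟩ := isPrintable_scan g c0 (regionCells B c0) gr ind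
    have hS0 : gr.getD c0 PySem.Set.empty = PySem.Set.empty := hfresh c0 (List.mem_cons_self ..)
    rw [hS0] at sa sd se
    -- the state after processing c0
    set st1 := (regionCells B c0).foldl (fun st rc => graphCell g c0 st rc.1 rc.2) (gr, ind) with hst1
    have hmemS : ∀ d, d ∈ st1.1.getD c0 PySem.Set.empty ↔
        (d ≠ c0 ∧ ∃ rc ∈ regionCells B c0, cellAt g rc.1 rc.2 = d) := by
      intro d
      constructor
      · intro h
        rcases (sa d).mp h with h' | h'
        · cases h'
        · exact h'
      · intro h
        exact (sa d).mpr (Or.inr h)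
    have hc0L : c0 ∉ L := (List.nodup_cons.mp hnd).1
    have hLnd : L.Nodup := (List.nodup_cons.mp hnd).2
    have hind1 : ∀ d, st1.2.getD d 0 =
        F d + (if d ≠ c0 ∧ ∃ rc ∈ regionCells B c0, cellAt g rc.1 rc.2 = d then 1 else 0) := by
      intro d
      rw [sd d, hindF d]
      congr 1
      by_cases hE : d ≠ c0 ∧ ∃ rc ∈ regionCells B c0, cellAt g rc.1 rc.2 = d
      · rw [if_pos hE, if_pos ⟨(hmemS d).mpr hE, by simp⟩]
      · rw [if_neg hE, if_neg (fun hc => hE ((hmemS d).mp hc.1))]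
    obtain ⟨ja, jb, jc, jd⟩ := ih st1.1 st1.2
      (fun d => F d + (if d ≠ c0 ∧ ∃ rc ∈ regionCells B c0, cellAt g rc.1 rc.2 = d then 1 else 0))
      hLnd
      (fun c hc => by
        rw [sc c (fun he => hc0L (he ▸ hc))]
        exact hfresh c (List.mem_cons_of_mem c0 hc))
      hind1
    refine ⟨?_, ?_, ?_, ?_⟩
    · intro c hc
      rcases List.mem_cons.mp hc with rfl | hcL
      · -- c = c0 : its set was finished by the scan and untouched afterwards
        have huntouched := isPrintable_outer_untouched g B L st1 c hc0L
        rw [huntouched]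
        exact ⟨hmemS, sb (by rw [hS0]; exact List.nodup_nil)⟩
      · exact ja c hcL
    · intro d
      rw [jb d, List.countP_cons]
      by_cases hE : d ≠ c0 ∧ ∃ rc ∈ regionCells B c0, cellAt g rc.1 rc.2 = d
      · rw [if_pos hE]; simp only [decide_eq_true_eq, if_pos hE]; push_cast; ring
      · rw [if_neg hE]; simp only [decide_eq_true_eq, if_neg hE]; push_cast; ring
    · intro x
      rw [jc x, se x]
      constructor
      · rintro ((h | ⟨h1, _⟩) | ⟨c, hcL, hE⟩)
        · exact Or.inl h
        · exact Or.inr ⟨c0, List.mem_cons_self .., (hmemS x).mp h1⟩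
        · exact Or.inr ⟨c, List.mem_cons_of_mem c0 hcL, hE⟩
      · rintro (h | ⟨c, hc, hE⟩)
        · exact Or.inl (Or.inl h)
        · rcases List.mem_cons.mp hc with rfl | hcL
          · exact Or.inl (Or.inr ⟨(hmemS x).mpr hE, by simp⟩)
          · exact Or.inr ⟨c, hcL, hE⟩
    · intro hnd0
      exact jd (sf hnd0)

-- the inner decrement loop over graph[color], characterized
theorem isPrintable_deps_fold (D : List Int) (hD : D.Nodup) :
    ∀ (q : List Int) (ind : PySem.Dict Int Int),
      (∀ x, (D.foldl (fun (st : List Int × PySem.Dict Int Int) dep =>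
          if (st.2.getD dep 0 - 1) == 0 then (st.1 ++ [dep], st.2.insert dep (st.2.getD dep 0 - 1))
          else (st.1, st.2.insert dep (st.2.getD dep 0 - 1))) (q, ind)).2.getD x 0 =
        ind.getD x 0 - (if x ∈ D then 1 else 0))
      ∧ (D.foldl (fun (st : List Int × PySem.Dict Int Int) dep =>
          if (st.2.getD dep 0 - 1) == 0 then (st.1 ++ [dep], st.2.insert dep (st.2.getD dep 0 - 1))
          else (st.1, st.2.insert dep (st.2.getD dep 0 - 1))) (q, ind)).1 =
        q ++ D.filter (fun y => ind.getD y 0 == 1) := by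
  induction D with
  | nil => intro q ind; exact ⟨fun x => by simp, by simp⟩
  | cons d D' ih =>
    intro q ind
    have hdD' : d ∉ D' := (List.nodup_cons.mp hD).1
    have hndD' : D'.Nodup := (List.nodup_cons.mp hD).2
    rw [List.foldl_cons]
    have hstep : (if (ind.getD d 0 - 1) == 0 then (q ++ [d], ind.insert d (ind.getD d 0 - 1))
        else (q, ind.insert d (ind.getD d 0 - 1))) =
        ((if (ind.getD d 0 - 1) == 0 then q ++ [d] else q), ind.insert d (ind.getD d 0 - 1)) := by
      by_cases h : (ind.getD d 0 - 1) == 0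
      · rw [if_pos h, if_pos h]
      · rw [if_neg h, if_neg h]
    rw [hstep]
    obtain ⟨ka, kb⟩ := (ih hndD') (if (ind.getD d 0 - 1) == 0 then q ++ [d] else q)
      (ind.insert d (ind.getD d 0 - 1))
    constructor
    · intro x
      rw [ka x, PySem.Dict.getD_insert]
      by_cases hx : x = d
      · subst hx
        rw [if_pos rfl, if_neg hdD', if_pos (List.mem_cons_self ..)]
        omega
      · rw [if_neg hx]
        by_cases hxD : x ∈ D'
        · rw [if_pos hxD, if_pos (List.mem_cons_of_mem d hxD)]
        · rw [if_neg hxD, if_neg (by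
            intro hc
            rcases List.mem_cons.mp hc with h | h
            · exact hx h
            · exact hxD h)]
    · rw [kb]
      have hcongr : D'.filter (fun y => (ind.insert d (ind.getD d 0 - 1)).getD y 0 == 1) =
          D'.filter (fun y => ind.getD y 0 == 1) := by
        apply List.filter_congr
        intro y hy
        rw [PySem.Dict.getD_insert, if_neg (fun he : y = d => hdD' (he ▸ hy))]
      rw [hcongr, List.filter_cons]
      by_cases h1 : ind.getD d 0 == 1
      · have h0 : (ind.getD d 0 - 1) == 0 := by
          simp only [beq_iff_eq] at h1 ⊢; omega
        rw [if_pos h0]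
        simp only [h1, if_pos]
        rw [List.append_cons, List.append_assoc]
        simp
      · have h0 : ¬ ((ind.getD d 0 - 1) == 0) := by
          simp only [beq_iff_eq] at h1 ⊢; omega
        rw [if_neg h0]
        simp [h1]

theorem isPrintable_pc_eq_zero_iff (g : List (List Int)) (B : PySem.Dict Int (List Int))
    (K P : List Int) (d : Int) :
    pc g B K P d = 0 ↔ ∀ c ∈ K, Eb g B c d = true → c ∈ P := by
  unfold pc
  rw [show ((K.countP (fun c => Eb g B c d && !(decide (c ∈ P))) : Int) = 0) ↔
      (K.countP (fun c => Eb g B c d && !(decide (c ∈ P))) = 0) by omega]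
  rw [List.countP_eq_zero]
  constructor
  · intro h c hc hE
    have := h c hc
    simp only [hE, Bool.true_and, Bool.not_eq_true', decide_eq_false_iff_not, not_not] at this
    exact this
  · intro h c hc
    simp only [Bool.and_eq_true, Bool.not_eq_true', decide_eq_false_iff_not, not_and, not_not]
    exact h c hc

theorem isPrintable_pc_ne_zero (g : List (List Int)) (B : PySem.Dict Int (List Int))
    (K P : List Int) (c d : Int) (hc : c ∈ K) (hE : Eb g B c d = true) (hP : c ∉ P) :
    pc g B K P d ≠ 0 := by
  intro h
  exact hP ((isPrintable_pc_eq_zero_iff g B K P d).mp h c hc hE)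

theorem isPrintable_pc_append (g : List (List Int)) (B : PySem.Dict Int (List Int))
    (K P : List Int) (hKnd : K.Nodup) (color : Int) (hck : color ∈ K) (hcp : color ∉ P) (d : Int) :
    pc g B K (P ++ [color]) d = pc g B K P d - (if Eb g B color d = true then 1 else 0) := by
  unfold pc
  have hpt : ∀ c, (Eb g B c d && !(decide (c ∈ P ++ [color]))) =
      ((Eb g B c d && !(decide (c ∈ P))) && !(c == color)) := by
    intro c
    by_cases hcc : c = color
    · subst hcc
      simp [hcp]
    · simp only [List.mem_append, List.mem_singleton, hcc, or_false]
      cases h1 : Eb g B c d <;> cases h2 : decide (c ∈ P) <;> simp_all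
  have hcnt : K.countP (fun c => Eb g B c d && !(decide (c ∈ P ++ [color]))) =
      K.countP (fun c => (Eb g B c d && !(decide (c ∈ P))) && !(c == color)) := by
    apply List.countP_congr
    intro c _
    rw [hpt c]
  rw [hcnt]
  by_cases hE : Eb g B color d = true
  · rw [if_pos hE]
    have hce := isPrintable_countP_erase K color (fun c => Eb g B c d && !(decide (c ∈ P))) hKnd hck
      (by simp [hE, hcp])
    beta_reduce at hce
    omega
  · rw [if_neg hE]
    have hcnt2 : K.countP (fun c => (Eb g B c d && !(decide (c ∈ P))) && !(c == color)) =
        K.countP (fun c => Eb g B c d && !(decide (c ∈ P))) := by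
      apply List.countP_congr
      intro c _
      by_cases hcc : c = color
      · subst hcc
        constructor
        · intro h
          exact absurd (Bool.and_eq_true_iff.mp (Bool.and_eq_true_iff.mp h).1).1 hE
        · intro h
          exact absurd (Bool.and_eq_true_iff.mp h).1 hE
      · simp [hcc]
    omega

-- the Kahn loop, fully characterized by its processed set
theorem isPrintable_kahn_main (g : List (List Int)) (B : PySem.Dict Int (List Int))
    (K : List Int) (grF : PySem.Dict Int (PySem.Set Int)) (hKnd : K.Nodup)
    (hG1 : ∀ c ∈ K, (∀ d, d ∈ grF.getD c PySem.Set.empty ↔ Eb g B c d = true) ∧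
      (grF.getD c PySem.Set.empty).Nodup)
    (hEmem : ∀ c d : Int, c ∈ K → Eb g B c d = true → d ∈ K) :
    ∀ (fuel : Nat) (queue P : List Int) (ind : PySem.Dict Int Int),
      (P ++ queue).Nodup → (∀ x ∈ P, x ∈ K) → (∀ x ∈ queue, x ∈ K) →
      (∀ d, ind.getD d 0 = pc g B K P d) →
      (∀ d ∈ K, (d ∈ P ∨ d ∈ queue) ↔ pc g B K P d = 0) →
      (∀ x, x ∈ P ∨ x ∈ queue → Cl g B K x) →
      K.length ≤ fuel + P.length →
      ∃ Pf : List Int, kahnLoop grF fuel queue ind (P.length : Int) = (Pf.length : Int)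
        ∧ Pf.Nodup ∧ (∀ x ∈ Pf, x ∈ K) ∧ (∀ x ∈ Pf, Cl g B K x)
        ∧ (∀ d ∈ K, pc g B K Pf d = 0 → d ∈ Pf) := by
  intro fuel
  induction fuel with
  | zero =>
    intro queue P ind hnd hPk hqk hind hmem hCl hfuel
    cases queue with
    | nil =>
      exact ⟨P, rfl, (List.nodup_append.mp hnd).1, hPk, fun x hx => hCl x (Or.inl hx),
        fun d hd h0 => ((hmem d hd).mpr h0).resolve_right (by simp)⟩
    | cons x rest =>
      exfalso
      have hxP : x ∉ P := by
        intro hc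
        exact (List.nodup_append.mp hnd).2.2 x hc x (List.mem_cons_self ..) rfl
      have hsub : (x :: P).Nodup := List.nodup_cons.mpr ⟨hxP, (List.nodup_append.mp hnd).1⟩
      have hlen := (List.subperm_of_subset hsub
        (fun y hy => by
          rcases List.mem_cons.mp hy with rfl | h
          · exact hqk y (List.mem_cons_self ..)
          · exact hPk y h)).length_le
      simp only [List.length_cons] at hlen
      omega
  | succ fuel ih =>
    intro queue P ind hnd hPk hqk hind hmem hCl hfuel
    cases queue with
    | nil =>
      exact ⟨P, rfl, (List.nodup_append.mp hnd).1, hPk, fun x hx => hCl x (Or.inl hx),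
        fun d hd h0 => ((hmem d hd).mpr h0).resolve_right (by simp)⟩
    | cons color rest =>
      have hck : color ∈ K := hqk color (List.mem_cons_self ..)
      have hcP : color ∉ P := by
        intro hc
        exact (List.nodup_append.mp hnd).2.2 color hc color (List.mem_cons_self ..) rfl
      have hpcc : pc g B K P color = 0 := (hmem color hck).mp (Or.inr (List.mem_cons_self ..))
      obtain ⟨hDmem, hDnd⟩ := hG1 color hck
      obtain ⟨ka, kb⟩ := isPrintable_deps_fold (grF.getD color PySem.Set.empty) hDnd rest ind
      rw [kahnLoop, kb]
      set newq := (grF.getD color PySem.Set.empty).filter (fun y => ind.getD y 0 == 1) with hnewq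
      set P' := P ++ [color] with hP'
      have hmem_new : ∀ y, y ∈ newq ↔ (Eb g B color y = true ∧ pc g B K P y = 1) := by
        intro y
        rw [hnewq, List.mem_filter, hDmem y, hind y]
        simp only [beq_iff_eq]
      have hpc' : ∀ d, pc g B K P' d = pc g B K P d - (if Eb g B color d = true then 1 else 0) :=
        isPrintable_pc_append g B K P hKnd color hck hcP
      have hEbne : ∀ y : Int, Eb g B color y = true → y ≠ color := by
        intro y hE
        have := (Bool.and_eq_true_iff.mp hE).1
        simpa using this
      have hnewq_fresh : ∀ y ∈ newq, y ∉ P ∧ y ∉ color :: rest := by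
        intro y hy
        obtain ⟨hE, hpc1⟩ := (hmem_new y).mp hy
        have hyK : y ∈ K := hEmem color y hck hE
        have hno : ¬ (y ∈ P ∨ y ∈ color :: rest) := by
          intro hc
          have := (hmem y hyK).mp hc
          omega
        exact ⟨fun hc => hno (Or.inl hc), fun hc => hno (Or.inr hc)⟩
      have hmemP' : ∀ y : Int, y ∈ P' ↔ (y ∈ P ∨ y = color) := by
        intro y; rw [hP', List.mem_append, List.mem_singleton]
      have hnd' : (P' ++ (rest ++ newq)).Nodup := by
        have h1 : (P' ++ rest).Nodup := by
          have h2 := (List.perm_middle (a := color) (l₁ := P) (l₂ := rest)).nodup hnd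
          have h3 := List.nodup_cons.mp h2
          have hperm2 : ((P ++ [color]) ++ rest).Perm (color :: (P ++ rest)) := by
            rw [List.append_assoc]
            exact List.perm_middle
          exact hperm2.symm.nodup (List.nodup_cons.mpr h3)
        rw [← List.append_assoc, List.nodup_append]
        refine ⟨h1, List.Nodup.filter _ hDnd, ?_⟩
        intro a ha b hb hab
        subst hab
        obtain ⟨hyP, hyq⟩ := hnewq_fresh a hb
        obtain ⟨hE, _⟩ := (hmem_new a).mp hb
        rcases List.mem_append.mp ha with h | h
        · rcases (hmemP' a).mp h with h' | rfl
          · exact hyP h'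
          · exact (hEbne a hE) rfl
        · exact hyq (List.mem_cons_of_mem color h)
      have hP'k : ∀ x ∈ P', x ∈ K := by
        intro x hx
        rcases (hmemP' x).mp hx with h | rfl
        · exact hPk x h
        · exact hck
      have hq'k : ∀ x ∈ rest ++ newq, x ∈ K := by
        intro x hx
        rcases List.mem_append.mp hx with h | h
        · exact hqk x (List.mem_cons_of_mem color h)
        · exact hEmem color x hck ((hmem_new x).mp h).1
      have hpc_nonneg : ∀ Q d, 0 ≤ pc g B K Q d := by
        intro Q d
        unfold pc
        positivity
      have hind' : ∀ d, (((grF.getD color PySem.Set.empty).foldl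
          (fun (st : List Int × PySem.Dict Int Int) dep =>
            if (st.2.getD dep 0 - 1) == 0 then (st.1 ++ [dep], st.2.insert dep (st.2.getD dep 0 - 1))
            else (st.1, st.2.insert dep (st.2.getD dep 0 - 1))) (rest, ind)).2).getD d 0 =
          pc g B K P' d := by
        intro d
        rw [ka d, hind d, hpc' d]
        congr 1
        by_cases hE : Eb g B color d = true
        · rw [if_pos ((hDmem d).mpr hE), if_pos hE]
        · rw [if_neg (fun hc => hE ((hDmem d).mp hc)), if_neg hE]
      have hmem' : ∀ d ∈ K, (d ∈ P' ∨ d ∈ rest ++ newq) ↔ pc g B K P' d = 0 := by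
        intro d hd
        rw [hpc' d]
        constructor
        · intro h
          rcases h with h | h
          · rcases (hmemP' d).mp h with h' | rfl
            · have h0 : pc g B K P d = 0 := (hmem d hd).mp (Or.inl h')
              have hnE : ¬ Eb g B color d = true := by
                intro hE
                exact isPrintable_pc_ne_zero g B K P color d hck hE hcP h0
              rw [if_neg hnE]; omega
            · rw [if_neg (by
                intro hE
                exact (hEbne d hE) rfl)]
              omega
          · rcases List.mem_append.mp h with h' | h'
            · have h0 : pc g B K P d = 0 := (hmem d hd).mp (Or.inr (List.mem_cons_of_mem color h'))
              have hnE : ¬ Eb g B color d = true := by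
                intro hE
                exact isPrintable_pc_ne_zero g B K P color d hck hE hcP h0
              rw [if_neg hnE]; omega
            · obtain ⟨hE, hpc1⟩ := (hmem_new d).mp h'
              rw [if_pos hE]; omega
        · intro h0
          by_cases hE : Eb g B color d = true
          · rw [if_pos hE] at h0
            have : pc g B K P d = 1 := by omega
            exact Or.inr (List.mem_append.mpr (Or.inr ((hmem_new d).mpr ⟨hE, this⟩)))
          · rw [if_neg hE] at h0
            have : pc g B K P d = 0 := by omega
            rcases (hmem d hd).mpr this with h | h
            · exact Or.inl ((hmemP' d).mpr (Or.inl h))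
            · rcases List.mem_cons.mp h with rfl | h'
              · exact Or.inl ((hmemP' d).mpr (Or.inr rfl))
              · exact Or.inr (List.mem_append.mpr (Or.inl h'))
      have hCl' : ∀ x, x ∈ P' ∨ x ∈ rest ++ newq → Cl g B K x := by
        intro x hx
        rcases hx with h | h
        · rcases (hmemP' x).mp h with h' | rfl
          · exact hCl x (Or.inl h')
          · exact hCl x (Or.inr (List.mem_cons_self ..))
        · rcases List.mem_append.mp h with h' | h'
          · exact hCl x (Or.inr (List.mem_cons_of_mem color h'))
          · obtain ⟨hE, hpc1⟩ := (hmem_new x).mp h'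
            have hxK : x ∈ K := hEmem color x hck hE
            refine Cl.intro x hxK (fun e he hEe => ?_)
            have h0 : pc g B K P' x = 0 := by
              rw [hpc' x, if_pos hE]; omega
            have heP' : e ∈ P' := (isPrintable_pc_eq_zero_iff g B K P' x).mp h0 e he hEe
            rcases (hmemP' e).mp heP' with h'' | rfl
            · exact hCl e (Or.inl h'')
            · exact hCl e (Or.inr (List.mem_cons_self ..))
      have hfuel' : K.length ≤ fuel + P'.length := by
        rw [hP', List.length_append]
        simp only [List.length_singleton]
        omega
      obtain ⟨Pf, hres, hPf⟩ := ih (rest ++ newq) P' _ hnd' hP'k hq'k hind' hmem' hCl' hfuel'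
      refine ⟨Pf, ?_, hPf⟩
      rw [← hres]
      congr 1
      rw [hP', List.length_append]
      push_cast
      simp

theorem isPrintable_A_iff (g : List (List Int)) :
    isPrintable g = true ↔
      (∀ c ∈ (buildBBox g (g.length : Int) ((PySem.List.pyGetD g 0 []).length : Int)).keys,
        Cl g (buildBBox g (g.length : Int) ((PySem.List.pyGetD g 0 []).length : Int))
          (buildBBox g (g.length : Int) ((PySem.List.pyGetD g 0 []).length : Int)).keys c) := by
  set rows : Int := (g.length : Int) with hrows
  set cols : Int := ((PySem.List.pyGetD g 0 []).length : Int) with hcols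
  set B := buildBBox g rows cols with hB
  set K := B.keys with hK
  set indeg0 : PySem.Dict Int Int := K.foldl (fun d c => d.insert c 0) PySem.Dict.empty with hindeg0
  set gi := buildGraphIndeg g B indeg0 with hgi
  set queue := gi.2.keys.filter (fun c => gi.2.getD c 0 == 0) with hqueue
  have hdef : isPrintable g = decide (kahnLoop gi.1 B.size queue gi.2 0 = (B.size : Int)) := rfl
  have hKnd : K.Nodup := isPrintable_keys_nodup g rows cols
  have hEmem : ∀ c d : Int, c ∈ K → Eb g B c d = true → d ∈ K :=
    fun c d hc hE => isPrintable_Eb_mem g rows cols c d hc hE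
  have hind0getD : ∀ x, indeg0.getD x 0 = 0 :=
    isPrintable_indeg0_getD K PySem.Dict.empty (fun x => PySem.Dict.getD_empty x 0) 
  have hind0keys : indeg0.keys = K := by
    rw [hindeg0]; exact isPrintable_indeg0_keys K hKnd
  -- the built graph and in_degree
  obtain ⟨ba, bb, bc, bd⟩ := isPrintable_build_inv g B K PySem.Dict.empty indeg0 (fun _ => 0)
    hKnd (fun c _ => PySem.Dict.getD_empty c PySem.Set.empty) hind0getD
  rw [← isPrintable_buildGraphIndeg_eq g B indeg0 hKnd, ← hgi] at ba bb bc bd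
  have hG1 : ∀ c ∈ K, (∀ d, d ∈ gi.1.getD c PySem.Set.empty ↔ Eb g B c d = true) ∧
      (gi.1.getD c PySem.Set.empty).Nodup := by
    intro c hc
    refine ⟨fun d => ?_, (ba c hc).2⟩
    rw [(ba c hc).1 d, hB, isPrintable_Eb_iff_region g rows cols c d]
  have hindF : ∀ d, gi.2.getD d 0 = pc g B K [] d := by
    intro d
    rw [bb d]
    unfold pc
    have : K.countP (fun c => decide (d ≠ c ∧ ∃ rc ∈ regionCells B c, cellAt g rc.1 rc.2 = d)) =
        K.countP (fun c => Eb g B c d && !(decide (d ∈ ([] : List Int)))) := by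
      apply List.countP_congr
      intro c _
      rw [hB]
      simp only [decide_eq_true_eq, Bool.and_eq_true, Bool.not_eq_true', decide_eq_false_iff_not]
      rw [← isPrintable_Eb_iff_region g rows cols c d]
      simp
    rw [this]
    simp
  have hkeysF : ∀ x, x ∈ gi.2.keys ↔ x ∈ K := by
    intro x
    rw [bc x, hind0keys]
    constructor
    · rintro (h | ⟨c, hc, hE⟩)
      · exact h
      · exact hEmem c x hc ((isPrintable_Eb_iff_region g rows cols c x).mpr hE)
    · exact Or.inl
  have hkeysFnd : gi.2.keys.Nodup := bd (hind0keys ▸ hKnd)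
  have hQmem : ∀ x, x ∈ queue ↔ (x ∈ K ∧ pc g B K [] x = 0) := by
    intro x
    rw [hqueue, List.mem_filter, hkeysF x, hindF x]
    simp only [beq_iff_eq]
  have hQnd : queue.Nodup := List.Nodup.filter _ hkeysFnd
  have hCl0 : ∀ x, x ∈ ([] : List Int) ∨ x ∈ queue → Cl g B K x := by
    rintro x (h | h)
    · cases h
    · obtain ⟨hxK, hpc0⟩ := (hQmem x).mp h
      refine Cl.intro x hxK (fun e he hE => ?_)
      have := (isPrintable_pc_eq_zero_iff g B K [] x).mp hpc0 e he hE
      cases this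
  have hsize : B.size = K.length := by
    rw [hK]
    unfold PySem.Dict.keys PySem.Dict.size
    rw [List.length_map]
  obtain ⟨Pf, hres, hPfnd, hPfK, hPfCl, hPfstable⟩ :=
    isPrintable_kahn_main g B K gi.1 hKnd hG1 hEmem B.size queue [] gi.2
      (by simpa using hQnd)
      (by simp)
      (fun x hx => ((hQmem x).mp hx).1)
      hindF
      (by
        intro d hd
        simp only [List.not_mem_nil, false_or]
        rw [hQmem d]
        exact ⟨fun h => h.2, fun h => ⟨hd, h⟩⟩)
      hCl0
      (by simp [hsize])
  rw [hdef]
  rw [show ((0 : Int)) = ((([] : List Int).length : Nat) : Int) by simp]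
  rw [hres]
  rw [decide_eq_true_iff]
  constructor
  · intro hlen c hc
    -- Pf has full length, so it contains all of K
    have hPfsub : ∀ x ∈ K, x ∈ Pf := by
      intro x hx
      by_contra hnx
      have hsub : (x :: Pf).Nodup := List.nodup_cons.mpr ⟨hnx, hPfnd⟩
      have := (List.subperm_of_subset hsub (fun y hy => by
        rcases List.mem_cons.mp hy with rfl | h
        · exact hx
        · exact hPfK y h)).length_le
      simp only [List.length_cons] at this
      have : (Pf.length : Int) = (K.length : Int) := by rw [hsize] at hlen; exact_mod_cast hlen
      omega
    exact hPfCl c (hPfsub c hc)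
  · intro hAll
    have hKsub : ∀ x, Cl g B K x → x ∈ Pf := by
      intro x hx
      induction hx with
      | intro c hc hp ihp =>
        apply hPfstable c hc
        rw [isPrintable_pc_eq_zero_iff]
        intro e he hE
        exact ihp e he hE
    have h1 : K.length ≤ Pf.length :=
      (List.subperm_of_subset hKnd (fun y hy => hKsub y (hAll y hy))).length_le
    have h2 : Pf.length ≤ K.length :=
      (List.subperm_of_subset hPfnd hPfK).length_le
    rw [hsize]
    omega

-- if every live color has a live blocker, no Cl color is live
theorem isPrintable_Cl_escapes (g : List (List Int)) (B : PySem.Dict Int (List Int))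
    (K live : List Int) (hlk : ∀ x ∈ live, x ∈ K)
    (hall : ∀ col ∈ live, ∃ other ∈ live, Eb g B other col = true) :
    ∀ c, Cl g B K c → c ∉ live := by
  intro c hCl
  induction hCl with
  | intro c hc hp ih =>
    intro hcl
    obtain ⟨other, hol, hE⟩ := hall c hcl
    exact ih other (hlk other hol) hE hol

-- the peel filter predicate, characterized
theorem isPrintable_peel_pred (g : List (List Int)) (B : PySem.Dict Int (List Int))
    (live : List Int) (col : Int) :
    (live.any (fun other => other != col && blocksB g B other col) = true) ↔
      ∃ other ∈ live, Eb g B other col = true := by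
  simp only [List.any_eq_true, Eb, Bool.and_eq_true, bne_iff_ne]
  constructor
  · rintro ⟨o, ho, hne, hb⟩; exact ⟨o, ho, Ne.symm hne, hb⟩
  · rintro ⟨o, ho, hne, hb⟩; exact ⟨o, ho, Ne.symm hne, hb⟩

theorem isPrintable_peel_iff (g : List (List Int)) (B : PySem.Dict Int (List Int))
    (K : List Int) :
    ∀ (n : Nat) (live : List Int), live.length = n → live.Nodup → (∀ x ∈ live, x ∈ K) →
      (∀ c ∈ K, c ∉ live → Cl g B K c) →
      (peelLoop g B live = true ↔ ∀ c ∈ K, Cl g B K c) := by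
  intro n
  induction n using Nat.strong_induction_on with
  | _ n ih =>
    intro live hlen hnd hlk hout
    rw [peelLoop]
    by_cases hnil : live = []
    · simp only [if_pos hnil]
      subst hnil
      simp only [true_iff]
      exact fun c hc => hout c hc (by simp)
    · simp only [if_neg hnil]
      set remaining := live.filter (fun col =>
        live.any (fun other => other != col && blocksB g B other col)) with hrem
      by_cases hstall : remaining.length = live.length
      · simp only [if_pos hstall]
        have hfe : remaining = live := List.Sublist.eq_of_length List.filter_sublist hstall
        have hall : ∀ col ∈ live, ∃ other ∈ live, Eb g B other col = true := by
          intro col hcol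
          exact (isPrintable_peel_pred g B live col).mp
            (List.filter_eq_self.mp (hrem ▸ hfe) col hcol)
        constructor
        · intro h; exact absurd h (by simp)
        · intro hAll
          obtain ⟨c0, hc0⟩ := List.exists_mem_of_ne_nil live hnil
          exact absurd hc0 (isPrintable_Cl_escapes g B K live hlk hall c0 (hAll c0 (hlk c0 hc0)))
      · simp only [if_neg hstall]
        have hlt : remaining.length < live.length :=
          Nat.lt_of_le_of_ne (List.length_filter_le _ live) hstall
        apply ih remaining.length (by omega) remaining rfl (List.Nodup.filter _ hnd)
          (fun x hx => hlk x (List.mem_of_mem_filter hx))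
        intro c hc hcr
        by_cases hcl : c ∈ live
        · have hpred : ¬ (live.any (fun other => other != c && blocksB g B other c) = true) := by
            intro hp
            exact hcr (hrem ▸ List.mem_filter.mpr ⟨hcl, hp⟩)
          refine Cl.intro c hc (fun d hd hE => ?_)
          by_cases hdl : d ∈ live
          · exact absurd ((isPrintable_peel_pred g B live c).mpr ⟨d, hdl, hE⟩) hpred
          · exact hout d hd hdl
        · exact hout c hc hcl

theorem isPrintable_B_iff (g : List (List Int)) :
    isPrintable_alt g = true ↔
      (∀ c ∈ (buildBBox g (g.length : Int) ((PySem.List.pyGetD g 0 []).length : Int)).keys,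
        Cl g (buildBBox g (g.length : Int) ((PySem.List.pyGetD g 0 []).length : Int))
          (buildBBox g (g.length : Int) ((PySem.List.pyGetD g 0 []).length : Int)).keys c) := by
  unfold isPrintable_alt
  exact isPrintable_peel_iff g _ _ _ _ rfl
    (isPrintable_keys_nodup g _ _) (fun x hx => hx) (fun c hc hcn => absurd hc hcn)

-- ===== VERDICT (by name: the statement is the Claim_ definition above) =====
theorem isPrintable_spec : Claim_equal_isPrintable := by
  intro g _ _
  unfold Spec_isPrintable
  have hA := isPrintable_A_iff g
  have hB := isPrintable_B_iff g
  cases hb : isPrintable_alt g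
  · cases ha : isPrintable g
    · rfl
    · rw [ha] at hA; rw [hb] at hB
      exact absurd (hB.mpr (hA.mp rfl)) (by simp)
  · cases ha : isPrintable g
    · rw [ha] at hA; rw [hb] at hB
      exact absurd (hA.mpr (hB.mp rfl)) (by simp)
    · rfl
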